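-- pv_equiv track=rewrite | github.com/anthonydu/technical-practices | hackerrank/ibm/front-end-test/q1.py | countFaults
-- ===== SOURCE A (Python) =====
-- def countFaults(n, logs):
--     counts = {}
--     replacements = 0
--     for i in range(len(logs)):
--         log = logs[i].split()
--         id = log[0]
--         status = log[1]
--         if status == "error":
--             if id in counts:
--                 counts[id] += 1
--             else:
--                 counts[id] = 1
--         else:
--             counts[id] = 0
--         if counts[id] >= 3:
--             replacements += 1
--             counts[id] = 0
--     return replacements
-- ===== SOURCE B (Python) =====
-- def countFaults(n, logs):
--     groups = {}
--     for log in logs: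
--         parts = log.split()
--         key, status = parts[0], parts[1]
--         groups[key] = groups.get(key, []) + [status]
--     total = 0
--     for statuses in groups.values():
--         run = 0
--         for s in statuses:
--             if s == "error":
--                 run += 1
--             else:
--                 total += run // 3
--                 run = 0
--         total += run // 3
--     return total
-- ===== Notes on version B (the rewrite author's own statement) =====
-- stated objective: alternative
-- what changed: Replaces A's single interleaved scan with a per-id counter dict by a two-pass group-then-scan: first build a dict mapping each id to its ordered status list, then walk each group once with a streak counter, flushing run // 3 replacements at each non-error and at the end.
import Mathlib
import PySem

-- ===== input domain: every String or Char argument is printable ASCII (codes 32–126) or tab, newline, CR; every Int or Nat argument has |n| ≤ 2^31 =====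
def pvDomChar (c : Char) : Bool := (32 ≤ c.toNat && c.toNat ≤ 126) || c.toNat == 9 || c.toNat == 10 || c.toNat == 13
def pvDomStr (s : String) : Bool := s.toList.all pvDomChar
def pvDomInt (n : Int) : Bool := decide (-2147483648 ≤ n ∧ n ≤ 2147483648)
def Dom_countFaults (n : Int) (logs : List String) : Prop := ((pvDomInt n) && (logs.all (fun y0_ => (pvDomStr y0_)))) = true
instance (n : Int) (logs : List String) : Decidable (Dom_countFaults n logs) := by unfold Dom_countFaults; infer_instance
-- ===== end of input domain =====

-- B replaces A's single interleaved scan with a per-id counter dict by a group-by-id pass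
-- followed by a per-group streak scan flushing run // 3 at each non-error and at the end (objective: alternative).

-- ===== PORT A =====
-- one loop iteration of A: parse the log line, update the per-id counter dict, maybe count a replacement
def countFaultsStep (st : PySem.Dict String Int × Int) (logline : String) : PySem.Dict String Int × Int :=
  let log := PySem.Str.split₀ logline
  let id := (PySem.List.pyGet? log 0).getD ""      -- IndexError here is excluded by Pre_
  let status := (PySem.List.pyGet? log 1).getD ""  -- IndexError here is excluded by Pre_
  let counts :=
    if status == "error" then
      if st.1.contains id then st.1.modify id 0 (· + 1) else st.1.insert id 1
    else st.1.insert id 0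
  if counts.getD id 0 ≥ 3 then (counts.insert id 0, st.2 + 1) else (counts, st.2)

def countFaults (n : Int) (logs : List String) : Int :=
  (logs.foldl countFaultsStep (PySem.Dict.empty, 0)).2

-- ===== PORT B =====
-- first pass of B: group the statuses by id, in order
def countFaultsGroups (logs : List String) : PySem.Dict String (List String) :=
  logs.foldl (fun groups logline =>
    let parts := PySem.Str.split₀ logline
    let key := (PySem.List.pyGet? parts 0).getD ""     -- IndexError here is excluded by Pre_
    let status := (PySem.List.pyGet? parts 1).getD ""  -- IndexError here is excluded by Pre_
    groups.modify key [] (· ++ [status])) PySem.Dict.empty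

def countFaults_alt (n : Int) (logs : List String) : Int :=
  let groups := countFaultsGroups logs
  groups.values.foldl (fun total statuses =>
    let rt := statuses.foldl
      (fun (rt : Int × Int) s =>
        if s == "error" then (rt.1 + 1, rt.2)
        else (0, rt.2 + PySem.Int.floordiv rt.1 3)) (0, total)
    rt.2 + PySem.Int.floordiv rt.1 3) 0

-- ===== PRECONDITION & SPEC =====
-- Pre_ excludes exactly the inputs where Python A raises IndexError: a log line with fewer
-- than two whitespace-separated tokens (B raises the same IndexError there).
def Pre_countFaults (n : Int) (logs : List String) : Prop :=
  ∀ log ∈ logs, 2 ≤ (PySem.Str.split₀ log).length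
instance (n : Int) (logs : List String) : Decidable (Pre_countFaults n logs) := by
  unfold Pre_countFaults; infer_instance
def pvWitness_countFaults : Int × List String :=
  (2, ["d1 error", "d1 error", "d2 ok", "d1 error", "d1 error"])

def Spec_countFaults (n : Int) (logs : List String) (out : Int) : Prop := out = countFaults_alt n logs
instance (n : Int) (logs : List String) (out : Int) : Decidable (Spec_countFaults n logs out) := by unfold Spec_countFaults; infer_instance

-- ===== CLAIM (what is proved, stated in full; the proofs are below) =====
def Claim_equal_countFaults : Prop := ∀ (n : Int) (logs : List String), Dom_countFaults n logs → Pre_countFaults n logs → Spec_countFaults n logs (countFaults n logs)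

-- ===== LEMMAS AND PROOFS =====

-- parse a log line to (id, status), the way both ports do
def parseLog (logline : String) : String × String :=
  let log := PySem.Str.split₀ logline
  ((PySem.List.pyGet? log 0).getD "", (PySem.List.pyGet? log 1).getD "")

-- the ordered statuses of id k among the parsed pairs
def stats (k : String) (ps : List (String × String)) : List String :=
  (ps.filter (fun p => p.1 == k)).map (·.2)

-- abstract one-status transition of A's per-id counter, and its replacement increment
def nextCnt (c : Int) (s : String) : Int :=
  if s == "error" then (if c + 1 ≥ 3 then 0 else c + 1) else 0
def incOf (c : Int) (s : String) : Int :=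
  if s == "error" then (if c + 1 ≥ 3 then 1 else 0) else 0

-- replacements A produces for one id's status list, starting from counter c
def runA : Int → List String → Int
  | _, [] => 0
  | c, s :: ss => incOf c s + runA (nextCnt c s) ss

def stepPair (st : PySem.Dict String Int × Int) (p : String × String) : PySem.Dict String Int × Int :=
  let counts :=
    if p.2 == "error" then
      if st.1.contains p.1 then st.1.modify p.1 0 (· + 1) else st.1.insert p.1 1
    else st.1.insert p.1 0
  if counts.getD p.1 0 ≥ 3 then (counts.insert p.1 0, st.2 + 1) else (counts, st.2)

-- effect of one A-step on the counter of any key k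
theorem step_getD (d : PySem.Dict String Int) (r : Int) (p : String × String) (k : String) :
    (stepPair (d, r) p).1.getD k 0 =
      if k = p.1 then nextCnt (d.getD p.1 0) p.2 else d.getD k 0 := by
  rcases p with ⟨id, s⟩
  by_cases hs : (s == "error") = true
  · by_cases hc : d.contains id = true
    · simp only [stepPair, nextCnt, hs, hc, if_true]
      by_cases h3 : d.getD id 0 + 1 ≥ 3
      · simp [PySem.Dict.getD_modify, PySem.Dict.getD_insert, h3]
        split_ifs <;> simp_all
      · simp [PySem.Dict.getD_modify, h3]
    · have h0 : d.getD id 0 = 0 := PySem.Dict.getD_of_not_contains d 0 (by simpa using hc)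
      simp only [stepPair, nextCnt, hs, hc, if_true, if_false, Bool.false_eq_true]
      simp [PySem.Dict.getD_insert, h0]
  · simp only [stepPair, nextCnt, hs, if_false, Bool.false_eq_true]
    simp [PySem.Dict.getD_insert]

theorem step_snd (d : PySem.Dict String Int) (r : Int) (p : String × String) :
    (stepPair (d, r) p).2 = r + incOf (d.getD p.1 0) p.2 := by
  rcases p with ⟨id, s⟩
  by_cases hs : (s == "error") = true
  · by_cases hc : d.contains id = true
    · simp only [stepPair, incOf, hs, hc, if_true]
      by_cases h3 : d.getD id 0 + 1 ≥ 3
      · simp [PySem.Dict.getD_modify_self, h3]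
      · simp [PySem.Dict.getD_modify_self, h3]
    · have h0 : d.getD id 0 = 0 := PySem.Dict.getD_of_not_contains d 0 (by simpa using hc)
      simp only [stepPair, incOf, hs, hc, if_true, if_false, Bool.false_eq_true]
      simp [PySem.Dict.getD_insert_self, h0]
  · simp only [stepPair, incOf, hs, if_false, Bool.false_eq_true]
    simp [PySem.Dict.getD_insert_self]

-- sum surgery: change f to g at the single occurrence of id
theorem sum_map_update (l : List String) (f g : String → Int) (id : String) (c : Int)
    (hl : l.Nodup) (hid : id ∈ l) (hne : ∀ k ∈ l, k ≠ id → f k = g k)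
    (h : f id = c + g id) : (l.map f).sum = c + (l.map g).sum := by
  induction l with
  | nil => simp at hid
  | cons a l ih =>
    rcases List.nodup_cons.mp hl with ⟨hnl, hnd⟩
    by_cases ha : a = id
    · subst ha
      have hfg : l.map f = l.map g := List.map_congr_left fun k hk =>
        hne k (List.mem_cons_of_mem _ hk) (fun he => hnl (he ▸ hk))
      simp only [List.map_cons, List.sum_cons, hfg, h]
      ring
    · have hidl : id ∈ l := by
        rcases List.mem_cons.mp hid with h' | h'
        · exact absurd h'.symm ha
        · exact h'
      have := ih hnd hidl (fun k hk hkid => hne k (List.mem_cons_of_mem _ hk) hkid)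
      simp only [List.map_cons, List.sum_cons, this, hne a (List.mem_cons_self ..) ha]
      ring

theorem sum_ofList_congr (l₁ l₂ : List String) (f : String → Int)
    (h : ∀ a, a ∈ l₁ ↔ a ∈ l₂) :
    ((PySem.Set.ofList l₁).map f).sum = ((PySem.Set.ofList l₂).map f).sum := by
  have hp : (PySem.Set.ofList l₁).Perm (PySem.Set.ofList l₂) := by
    rw [List.perm_ext_iff_of_nodup (PySem.Set.nodup_ofList _) (PySem.Set.nodup_ofList _)]
    intro a
    simp only [PySem.Set.mem_ofList]
    exact h a
  exact (hp.map f).sum_eq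

theorem ofList_cons_of_not_mem (id : String) (l : List String) (h : id ∉ l) :
    PySem.Set.ofList (id :: l) = id :: PySem.Set.ofList l := by
  have h1 : PySem.Set.ofList (id :: l) = PySem.Set.update [id] l := by
    simp [PySem.Set.ofList_eq_foldl, PySem.Set.update, PySem.Set.add, PySem.Set.contains]
  rw [h1, PySem.Set.update_eq_append_filter]
  have h2 : ∀ y ∈ PySem.Set.ofList l, (!PySem.Set.contains [id] y) = true := by
    intro y hy
    have : y ∈ l := by simpa [PySem.Set.mem_ofList] using hy
    simp [PySem.Set.contains]
    exact fun he => h (he ▸ this)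
  rw [List.filter_eq_self.mpr h2]
  rfl

theorem stats_cons (k : String) (p : String × String) (ps : List (String × String)) :
    stats k (p :: ps) = if p.1 = k then p.2 :: stats k ps else stats k ps := by
  simp only [stats, List.filter_cons]
  by_cases h : p.1 = k <;> simp [h]

theorem stats_nil_of_not_mem (k : String) (ps : List (String × String))
    (h : k ∉ ps.map (·.1)) : stats k ps = [] := by
  simp only [stats, List.map_eq_nil_iff, List.filter_eq_nil_iff]
  intro p hp hbeq
  exact h (List.mem_map.mpr ⟨p, hp, by simpa using hbeq⟩)

-- A's interleaved fold equals the per-id sum of runA over the grouped statuses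
theorem A_sum (ps : List (String × String)) : ∀ (d : PySem.Dict String Int) (r : Int),
    (ps.foldl stepPair (d, r)).2 =
      r + ((PySem.Set.ofList (ps.map (·.1))).map
            (fun k => runA (d.getD k 0) (stats k ps))).sum := by
  induction ps with
  | nil => intro d r; simp [PySem.Set.ofList_eq_foldl]
  | cons p rest ih =>
    intro d r
    rcases p with ⟨id, s⟩
    have hG : ∀ k, (stepPair (d, r) (id, s)).1.getD k 0 =
        if k = id then nextCnt (d.getD id 0) s else d.getD k 0 :=
      fun k => step_getD d r (id, s) k
    have hpair : stepPair (d, r) (id, s) =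
        ((stepPair (d, r) (id, s)).1, r + incOf (d.getD id 0) s) := by
      rw [← step_snd d r (id, s)]
    rw [List.foldl_cons, hpair, ih]
    have hfg : ∀ k, k ≠ id →
        runA (d.getD k 0) (stats k ((id, s) :: rest)) =
          runA ((stepPair (d, r) (id, s)).1.getD k 0) (stats k rest) := by
      intro k hk
      rw [stats_cons, hG k, if_neg hk, if_neg (fun h => hk h.symm)]
    have hfid :
        runA (d.getD id 0) (stats id ((id, s) :: rest)) =
          incOf (d.getD id 0) s +
            runA ((stepPair (d, r) (id, s)).1.getD id 0) (stats id rest) := by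
      rw [stats_cons, if_pos rfl, hG id, if_pos rfl]
      simp [runA]
    by_cases hmem : id ∈ rest.map (·.1)
    · have hcongr := sum_ofList_congr (List.map (·.1) ((id, s) :: rest)) (rest.map (·.1))
        (fun k => runA (d.getD k 0) (stats k ((id, s) :: rest)))
        (by
          intro a
          simp only [List.map_cons, List.mem_cons]
          constructor
          · rintro (h' | h')
            · exact h' ▸ hmem
            · exact h'
          · exact Or.inr)
      rw [hcongr]
      rw [sum_map_update (PySem.Set.ofList (rest.map (·.1)))
        (fun k => runA (d.getD k 0) (stats k ((id, s) :: rest)))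
        (fun k => runA ((stepPair (d, r) (id, s)).1.getD k 0) (stats k rest))
        id (incOf (d.getD id 0) s) (PySem.Set.nodup_ofList _)
        (by simpa [PySem.Set.mem_ofList] using hmem)
        (fun k _ hk => hfg k hk) hfid]
      ring
    · have hl : List.map (·.1) ((id, s) :: rest) = id :: rest.map (·.1) := by simp
      rw [hl, ofList_cons_of_not_mem id _ hmem, List.map_cons, List.sum_cons]
      have hid0 : runA (d.getD id 0) (stats id ((id, s) :: rest)) = incOf (d.getD id 0) s := by
        rw [hfid, stats_nil_of_not_mem id rest hmem]
        simp [runA]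
      rw [hid0, List.map_congr_left (fun k hk => hfg k
        (fun he => hmem (he ▸ (by simpa [PySem.Set.mem_ofList] using hk))))]
      ring

-- B's inner streak loop computes runA
theorem B_inner (ss : List String) : ∀ (run total : Int), 0 ≤ run →
    (let rt := ss.foldl
        (fun (rt : Int × Int) s =>
          if s == "error" then (rt.1 + 1, rt.2)
          else (0, rt.2 + PySem.Int.floordiv rt.1 3)) (run, total)
     rt.2 + PySem.Int.floordiv rt.1 3) =
      total + PySem.Int.floordiv run 3 + runA (run % 3) ss := by
  induction ss with
  | nil => intro run total _; simp [runA]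
  | cons s ss ih =>
    intro run total hrun
    by_cases hs : (s == "error") = true
    · simp only [List.foldl_cons, hs, if_true]
      rw [ih (run + 1) total (by omega)]
      simp only [runA, incOf, nextCnt, hs, if_true,
        PySem.Int.floordiv_eq_ediv_of_pos (show (0:Int) < 3 by norm_num)]
      by_cases h2 : run % 3 + 1 ≥ 3
      · rw [if_pos h2, if_pos h2]
        have e2 : (run + 1) % 3 = 0 := by omega
        have e1 : (run + 1) / 3 = run / 3 + 1 := by omega
        rw [e2, e1]; ring
      · rw [if_neg h2, if_neg h2]
        have e2 : (run + 1) % 3 = run % 3 + 1 := by omega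
        have e1 : (run + 1) / 3 = run / 3 := by omega
        rw [e2, e1]; ring
    · simp only [List.foldl_cons, hs, Bool.false_eq_true, if_false]
      rw [ih 0 (total + PySem.Int.floordiv run 3) (le_refl 0)]
      simp only [runA, incOf, nextCnt, hs, Bool.false_eq_true, if_false]
      have e0 : PySem.Int.floordiv 0 3 = 0 := by
        rw [PySem.Int.floordiv_eq_ediv_of_pos (show (0:Int) < 3 by norm_num)]
        norm_num
      have em : (0:Int) % 3 = 0 := by norm_num
      rw [e0, em]; ring

-- B equals the same per-id sum
theorem B_sum (logs : List String) :
    countFaults_alt 0 logs =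
      ((PySem.Set.ofList ((logs.map parseLog).map (·.1))).map
        (fun k => runA 0 (stats k (logs.map parseLog)))).sum := by
  have hg : countFaultsGroups logs =
      (logs.map parseLog).foldl
        (fun d p => d.modify p.1 [] (fun v => v ++ [p.2])) PySem.Dict.empty := by
    unfold countFaultsGroups; rw [List.foldl_map]; rfl
  have hnodup : (countFaultsGroups logs).keys.Nodup := by
    rw [hg]
    exact PySem.Dict.nodup_keys_foldl_modify_key (logs.map parseLog) (fun p => p.1) []
      (fun _ p v => v ++ [p.2]) PySem.Dict.empty (by simp)
  have hkeys : (countFaultsGroups logs).keys =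
      PySem.Set.ofList ((logs.map parseLog).map (·.1)) := by
    rw [hg]
    have h := PySem.Dict.keys_foldl_modify_key (logs.map parseLog) (fun p => p.1) []
      (fun _ p v => v ++ [p.2]) PySem.Dict.empty
    refine h.trans ?_
    rw [PySem.Dict.keys_empty, PySem.Set.update_nil_left]
  have hget : ∀ k, (countFaultsGroups logs).getD k [] = stats k (logs.map parseLog) := by
    intro k
    rw [hg]
    have h := PySem.Dict.getD_foldl_modify_append (logs.map parseLog) PySem.Dict.empty k
    simpa [PySem.Dict.getD_empty, stats] using h
  have hval : (countFaultsGroups logs).values =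
      (PySem.Set.ofList ((logs.map parseLog).map (·.1))).map
        (fun k => stats k (logs.map parseLog)) := by
    rw [PySem.Dict.values_eq_map_keys _ hnodup ([] : List String), hkeys]
    exact List.map_congr_left (fun k _ => hget k)
  have hstep : (fun (total : Int) (statuses : List String) =>
        let rt := statuses.foldl
          (fun (rt : Int × Int) s =>
            if s == "error" then (rt.1 + 1, rt.2)
            else (0, rt.2 + PySem.Int.floordiv rt.1 3)) (0, total)
        rt.2 + PySem.Int.floordiv rt.1 3) =
      fun (total : Int) (statuses : List String) => total + runA 0 statuses := by
    funext total ss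
    have h := B_inner ss 0 total (le_refl 0)
    have e0 : PySem.Int.floordiv 0 3 = 0 := by
      rw [PySem.Int.floordiv_eq_ediv_of_pos (show (0:Int) < 3 by norm_num)]
      norm_num
    simpa [e0] using h
  rw [show countFaults_alt 0 logs = List.foldl
      (fun (total : Int) (statuses : List String) =>
        let rt := statuses.foldl
          (fun (rt : Int × Int) s =>
            if s == "error" then (rt.1 + 1, rt.2)
            else (0, rt.2 + PySem.Int.floordiv rt.1 3)) (0, total)
        rt.2 + PySem.Int.floordiv rt.1 3) 0 (countFaultsGroups logs).values from rfl]
  rw [hstep, PySem.List.foldl_add _ (fun ss => runA 0 ss) 0, hval, List.map_map]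
  simp only [Function.comp_def, zero_add]

theorem alt_n_irrel (n m : Int) (logs : List String) :
    countFaults_alt n logs = countFaults_alt m logs := rfl

-- ===== VERDICT (by name: the statement is the Claim_ definition above) =====
theorem countFaults_spec : Claim_equal_countFaults := by
  intro n logs _ _
  unfold Spec_countFaults
  rw [alt_n_irrel n 0, B_sum, countFaults]
  have hb : logs.foldl countFaultsStep (PySem.Dict.empty, 0) =
      (logs.map parseLog).foldl stepPair (PySem.Dict.empty, 0) := by
    rw [List.foldl_map]; rfl
  rw [hb, A_sum]
  simp [PySem.Dict.getD_empty]
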